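-- pv_equiv track=rewrite | github.com/saddhu1005/Coursera-DataStructuresAlgorithms | Genome-Assembly-Programming-Challenge/week3/optimal_k.py | checkIfOptimized
-- ===== SOURCE A (Python) =====
-- def checkIfOptimized(k, reads):
-- 	k_mers = set()
-- 	for read in reads:
-- 		for i in range(0, len(read)-k+1):
-- 			k_mers.add(read[i:i+k])
-- 	prefix_set = set()
-- 	suffix_set = set()
-- 	for k_mer in k_mers:
-- 		prefix_set.add(k_mer[:-1])
-- 		suffix_set.add(k_mer[1:])
-- 	return prefix_set == suffix_set
-- ===== SOURCE B (Python) =====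
-- def checkIfOptimized(k, reads):
-- 	roles = {}
-- 	for read in reads:
-- 		for i in range(0, len(read)-k+1):
-- 			k_mer = read[i:i+k]
-- 			pre = k_mer[:-1]
-- 			suf = k_mer[1:]
-- 			roles[pre] = (True, roles.get(pre, (False, False))[1])
-- 			roles[suf] = (roles.get(suf, (False, False))[0], True)
-- 	return all(p and s for (p, s) in roles.values())
-- ===== Notes on version B (the rewrite author's own statement) =====
-- stated objective: alternative
-- what changed: Replaces the three-set strategy (collect all k-mers into a set, then build prefix and suffix sets and compare them for equality) by a single pass that maintains one role table mapping each (k-1)-mer node to an (is_prefix, is_suffix) flag pair and finally checks that every node has both flags.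
import Mathlib
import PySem

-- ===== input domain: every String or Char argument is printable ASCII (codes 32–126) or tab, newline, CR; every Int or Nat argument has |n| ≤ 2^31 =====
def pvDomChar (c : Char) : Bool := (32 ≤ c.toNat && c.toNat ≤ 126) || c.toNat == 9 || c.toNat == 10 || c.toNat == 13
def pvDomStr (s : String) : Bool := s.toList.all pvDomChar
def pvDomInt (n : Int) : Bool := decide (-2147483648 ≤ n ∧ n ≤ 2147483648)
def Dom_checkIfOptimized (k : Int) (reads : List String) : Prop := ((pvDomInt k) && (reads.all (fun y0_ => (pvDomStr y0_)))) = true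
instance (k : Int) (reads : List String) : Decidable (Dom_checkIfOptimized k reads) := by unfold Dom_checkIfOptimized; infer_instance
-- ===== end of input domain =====

-- B replaces A's three-set strategy (collect the k-mer set, build prefix and suffix sets, compare)
-- by one pass keeping a single role table node ↦ (is_prefix, is_suffix) and a final completeness check.

-- k_mer[:-1] and k_mer[1:] (shared slice helpers used verbatim by both Pythons)
def pvPre (km : String) : String := PySem.Str.slice km none (some (-1))
def pvSuf (km : String) : String := PySem.Str.slice km (some 1) none

-- ===== PORT A =====
def checkIfOptimized (k : Int) (reads : List String) : Bool :=
  let k_mers : PySem.Set String := reads.foldl (fun km read =>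
    (PySem.List.pyRange 0 (PySem.Str.len read - k + 1) 1).foldl
      (fun km i => PySem.Set.add km (PySem.Str.slice read (some i) (some (i + k)))) km)
    PySem.Set.empty
  let ps : PySem.Set String × PySem.Set String :=
    k_mers.foldl (fun ps k_mer => (PySem.Set.add ps.1 (pvPre k_mer), PySem.Set.add ps.2 (pvSuf k_mer)))
      (PySem.Set.empty, PySem.Set.empty)
  PySem.Set.equal ps.1 ps.2

-- ===== PORT B =====
def checkIfOptimized_alt (k : Int) (reads : List String) : Bool :=
  let roles : PySem.Dict String (Bool × Bool) := reads.foldl (fun d read =>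
    (PySem.List.pyRange 0 (PySem.Str.len read - k + 1) 1).foldl (fun d i =>
      let k_mer := PySem.Str.slice read (some i) (some (i + k))
      let d1 := d.insert (pvPre k_mer) (true, (d.getD (pvPre k_mer) (false, false)).2)
      d1.insert (pvSuf k_mer) ((d1.getD (pvSuf k_mer) (false, false)).1, true)) d)
    PySem.Dict.empty
  roles.values.all (fun p => p.1 && p.2)

-- ===== PRECONDITION & SPEC =====
def Spec_checkIfOptimized (k : Int) (reads : List String) (out : Bool) : Prop := out = checkIfOptimized_alt k reads
instance (k : Int) (reads : List String) (out : Bool) : Decidable (Spec_checkIfOptimized k reads out) := by unfold Spec_checkIfOptimized; infer_instance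

-- ===== CLAIM (what is proved, stated in full; the proofs are below) =====
def Claim_equal_checkIfOptimized : Prop := ∀ (k : Int) (reads : List String), Dom_checkIfOptimized k reads → Spec_checkIfOptimized k reads (checkIfOptimized k reads)

-- ===== LEMMAS AND PROOFS =====

-- the list of k-mers of one read, and of all reads, in scan order
def pvKmersOf (k : Int) (read : String) : List String :=
  (PySem.List.pyRange 0 (PySem.Str.len read - k + 1) 1).map
    (fun i => PySem.Str.slice read (some i) (some (i + k)))

def pvKms (k : Int) (reads : List String) : List String := (reads.map (pvKmersOf k)).flatten

-- B's per-k-mer dict update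
def pvStep (d : PySem.Dict String (Bool × Bool)) (km : String) : PySem.Dict String (Bool × Bool) :=
  let d1 := d.insert (pvPre km) (true, (d.getD (pvPre km) (false, false)).2)
  d1.insert (pvSuf km) ((d1.getD (pvSuf km) (false, false)).1, true)

lemma pvStep_getD (d : PySem.Dict String (Bool × Bool)) (km : String) (v : String) :
    (pvStep d km).getD v (false, false) =
      ((d.getD v (false, false)).1 || decide (pvPre km = v),
       (d.getD v (false, false)).2 || decide (pvSuf km = v)) := by
  unfold pvStep
  simp only [PySem.Dict.getD_insert]
  by_cases h1 : v = pvPre km <;> by_cases h2 : v = pvSuf km <;>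
    by_cases h3 : pvSuf km = pvPre km <;>
    simp_all [eq_comm]

lemma pvStepFold_getD (l : List String) (d : PySem.Dict String (Bool × Bool)) (v : String) :
    ((l.foldl pvStep d).getD v (false, false)) =
      ((d.getD v (false, false)).1 || decide (∃ km ∈ l, pvPre km = v),
       (d.getD v (false, false)).2 || decide (∃ km ∈ l, pvSuf km = v)) := by
  induction l generalizing d with
  | nil => simp
  | cons km l ih =>
    simp only [List.foldl_cons, ih, pvStep_getD, List.exists_mem_cons_iff, Bool.decide_or,
      Bool.or_assoc]

lemma pvStep_contains (d : PySem.Dict String (Bool × Bool)) (km : String) (v : String) :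
    (pvStep d km).contains v = (d.contains v || decide (pvPre km = v ∨ pvSuf km = v)) := by
  unfold pvStep
  simp only [PySem.Dict.contains_insert, Bool.decide_or, beq_eq_decide]
  by_cases h1 : v = pvPre km <;> by_cases h2 : v = pvSuf km <;> simp_all [eq_comm]

lemma pvStepFold_contains (l : List String) (d : PySem.Dict String (Bool × Bool)) (v : String) :
    (l.foldl pvStep d).contains v =
      (d.contains v || decide (∃ km ∈ l, pvPre km = v ∨ pvSuf km = v)) := by
  induction l generalizing d with
  | nil => simp
  | cons km l ih =>
    simp only [List.foldl_cons, ih, pvStep_contains, List.exists_mem_cons_iff, Bool.decide_or,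
      Bool.or_assoc]

lemma pvStepFold_nodup (l : List String) (d : PySem.Dict String (Bool × Bool))
    (h : d.keys.Nodup) : (l.foldl pvStep d).keys.Nodup := by
  induction l generalizing d with
  | nil => exact h
  | cons km l ih =>
    exact ih _ (PySem.Dict.nodup_keys_insert _ _ _ (PySem.Dict.nodup_keys_insert _ _ _ h))

-- A as a statement about membership in the flat k-mer list
lemma pvA_iff (k : Int) (reads : List String) :
    checkIfOptimized k reads = true ↔
      (∀ v, (∃ km ∈ pvKms k reads, pvPre km = v) ↔ (∃ km ∈ pvKms k reads, pvSuf km = v)) := by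
  unfold checkIfOptimized
  have hk : reads.foldl (fun km read =>
      (PySem.List.pyRange 0 (PySem.Str.len read - k + 1) 1).foldl
        (fun km i => PySem.Set.add km (PySem.Str.slice read (some i) (some (i + k)))) km)
      PySem.Set.empty = PySem.Set.ofList (pvKms k reads) := by
    rw [PySem.Set.ofList_eq_foldl, pvKms, List.foldl_flatten, List.foldl_map]
    simp only [pvKmersOf, List.foldl_map]
    rfl
  have hp := PySem.List.foldl_prod_mk (fun s e => PySem.Set.add s (pvPre e))
    (fun s e => PySem.Set.add s (pvSuf e)) (PySem.Set.ofList (pvKms k reads))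
    PySem.Set.empty PySem.Set.empty
  simp only [hk, hp, PySem.Set.equal_iff]
  apply forall_congr'
  intro v
  rw [PySem.Set.mem_foldl_add, PySem.Set.mem_foldl_add]
  simp [PySem.Set.empty, PySem.Set.mem_ofList, eq_comm]

-- B as a statement about membership in the flat k-mer list
lemma pvB_iff (k : Int) (reads : List String) :
    checkIfOptimized_alt k reads = true ↔
      (∀ v, ((∃ km ∈ pvKms k reads, pvPre km = v) ∨ (∃ km ∈ pvKms k reads, pvSuf km = v)) →
        ((∃ km ∈ pvKms k reads, pvPre km = v) ∧ (∃ km ∈ pvKms k reads, pvSuf km = v))) := by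
  unfold checkIfOptimized_alt
  have hd : reads.foldl (fun d read =>
      (PySem.List.pyRange 0 (PySem.Str.len read - k + 1) 1).foldl (fun d i =>
        let k_mer := PySem.Str.slice read (some i) (some (i + k))
        let d1 := d.insert (pvPre k_mer) (true, (d.getD (pvPre k_mer) (false, false)).2)
        d1.insert (pvSuf k_mer) ((d1.getD (pvSuf k_mer) (false, false)).1, true)) d)
      PySem.Dict.empty = (pvKms k reads).foldl pvStep PySem.Dict.empty := by
    rw [pvKms, List.foldl_flatten, List.foldl_map]
    simp only [pvKmersOf, List.foldl_map]
    rfl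
  simp only [hd]
  have hnd := pvStepFold_nodup (pvKms k reads) PySem.Dict.empty (by simp)
  rw [PySem.Dict.values_eq_map_keys _ hnd (false, false), List.all_map, List.all_eq_true]
  have hkeys : ∀ v, v ∈ ((pvKms k reads).foldl pvStep PySem.Dict.empty).keys ↔
      ((∃ km ∈ pvKms k reads, pvPre km = v) ∨ (∃ km ∈ pvKms k reads, pvSuf km = v)) := by
    intro v
    rw [← PySem.Dict.contains_iff_mem_keys, pvStepFold_contains]
    simp only [PySem.Dict.contains_empty, Bool.false_or, decide_eq_true_eq]
    constructor
    · rintro ⟨km, hkm, he | he⟩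
      · exact Or.inl ⟨km, hkm, he⟩
      · exact Or.inr ⟨km, hkm, he⟩
    · rintro (⟨km, hkm, he⟩ | ⟨km, hkm, he⟩)
      · exact ⟨km, hkm, Or.inl he⟩
      · exact ⟨km, hkm, Or.inr he⟩
  have hval : ∀ v, (((fun p => p.1 && p.2) ∘ fun v =>
      ((pvKms k reads).foldl pvStep PySem.Dict.empty).getD v (false, false)) v = true) ↔
      ((∃ km ∈ pvKms k reads, pvPre km = v) ∧ (∃ km ∈ pvKms k reads, pvSuf km = v)) := by
    intro v
    simp only [Function.comp_apply, pvStepFold_getD]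
    simp [PySem.Dict.getD_empty]
  constructor
  · intro h v hv
    exact (hval v).mp (h v ((hkeys v).mpr hv))
  · intro h v hv
    exact (hval v).mpr (h v ((hkeys v).mp hv))

-- ===== VERDICT (by name: the statement is the Claim_ definition above) =====
theorem checkIfOptimized_spec : Claim_equal_checkIfOptimized := by
  intro k reads _
  unfold Spec_checkIfOptimized
  have hiff : (checkIfOptimized k reads = true) ↔ (checkIfOptimized_alt k reads = true) := by
    rw [pvA_iff, pvB_iff]
    constructor
    · intro h v hv
      rcases hv with hp | hs
      · exact ⟨hp, (h v).mp hp⟩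
      · exact ⟨(h v).mpr hs, hs⟩
    · intro h v
      constructor
      · intro hp
        exact (h v (Or.inl hp)).2
      · intro hs
        exact (h v (Or.inr hs)).1
  exact Bool.eq_iff_iff.mpr hiff
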